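-- pv_equiv track=rewrite | github.com/isrusin/external_DBs | Nucleotide/check_loaded.py | group_symbol_counts
-- ===== SOURCE A (Python) =====
-- def group_symbol_counts(counts):
--     grouped_smbls = {
--         "ACGT": "acgt", "N": "n", "IUPAC": "bdhvukmryws",
--         "SPACE": " \t\r", "BREAK": "\n", "GAP": "-.", "BAD": ""
--     }
--     smbl_groups = {
--         smbl: grp for grp in grouped_smbls for smbl in grouped_smbls[grp]
--     }
--     group_counts = dict.fromkeys(grouped_smbls, 0)
--     for smbl, count in counts.items():
--         grp = smbl_groups.get(smbl, "BAD")
--         group_counts[grp] += count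
--     length = sum(group_counts[grp] for grp in ("ACGT", "N", "IUPAC"))
--     group_counts["NUCLS"] = length
--     return group_counts
-- ===== SOURCE B (Python) =====
-- def group_symbol_counts(counts):
--     grouped_smbls = {
--         "ACGT": "acgt", "N": "n", "IUPAC": "bdhvukmryws",
--         "SPACE": " \t\r", "BREAK": "\n", "GAP": "-."
--     }
--     totals = {
--         grp: sum(counts.get(smbl, 0) for smbl in smbls)
--         for grp, smbls in grouped_smbls.items()
--     }
--     bad = sum(counts.values()) - sum(totals.values())
--     nucls = totals["ACGT"] + totals["N"] + totals["IUPAC"]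
--     return {**totals, "BAD": bad, "NUCLS": nucls}
-- ===== Notes on version B (the rewrite author's own statement) =====
-- stated objective: simpler
-- what changed: B drops A's inverted per-symbol lookup table and per-entry classification loop: it sums counts.get(s, 0) over each fixed group's symbols directly, obtains BAD by subtracting the grouped totals from the total of all counts, and builds the result dict in one literal expression.
import Mathlib
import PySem

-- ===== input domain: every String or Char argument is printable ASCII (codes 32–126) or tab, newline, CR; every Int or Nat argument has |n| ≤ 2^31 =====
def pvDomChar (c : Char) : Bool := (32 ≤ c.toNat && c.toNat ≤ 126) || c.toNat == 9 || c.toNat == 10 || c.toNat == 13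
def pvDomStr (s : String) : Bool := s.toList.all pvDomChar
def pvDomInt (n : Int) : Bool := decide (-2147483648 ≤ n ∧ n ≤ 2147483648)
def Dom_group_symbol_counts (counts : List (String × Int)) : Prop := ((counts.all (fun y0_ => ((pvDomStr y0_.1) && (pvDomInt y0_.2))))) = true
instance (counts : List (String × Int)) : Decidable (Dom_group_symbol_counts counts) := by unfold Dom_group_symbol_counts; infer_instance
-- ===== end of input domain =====

-- B aggregates by iterating the fixed group table (per-group lookup sums, BAD by subtraction)
-- instead of inverting the table into a per-symbol map and folding over the input: a simpler decomposition.


-- ===== PORT A =====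
def pvGroupedSmbls : PySem.Dict String String :=
  ((((((PySem.Dict.empty.insert "ACGT" "acgt").insert "N" "n").insert "IUPAC"
      "bdhvukmryws").insert "SPACE" " \t\r").insert "BREAK" "\n").insert "GAP" "-.").insert "BAD" ""

-- smbl_groups = {smbl: grp for grp in grouped_smbls for smbl in grouped_smbls[grp]}
-- (grouped_smbls[grp] never raises here since grp ranges over its own keys; getD "" is exact)
def pvSmblGroups : PySem.Dict String String :=
  pvGroupedSmbls.keys.foldl
    (fun d grp => (pvGroupedSmbls.getD grp "").toList.foldl
      (fun d c => d.insert (String.singleton c) grp) d)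
    PySem.Dict.empty

def group_symbol_counts (counts : List (String × Int)) : List (String × Int) :=
  -- group_counts = dict.fromkeys(grouped_smbls, 0)
  let gc0 : PySem.Dict String Int :=
    pvGroupedSmbls.keys.foldl (fun d grp => d.insert grp 0) PySem.Dict.empty
  -- for smbl, count: grp = smbl_groups.get(smbl, "BAD"); group_counts[grp] += count
  -- (grp is always a key of group_counts, so KeyError never occurs; modify with default 0 is exact)
  let gc := counts.foldl
    (fun gc p => gc.modify ((pvSmblGroups.get? p.1).getD "BAD") 0 (· + p.2)) gc0
  let length := gc.getD "ACGT" 0 + (gc.getD "N" 0 + (gc.getD "IUPAC" 0 + 0))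
  (gc.insert "NUCLS" length).items

-- ===== PORT B =====
def pvTot (counts : List (String × Int)) (smbls : String) : Int :=
  (smbls.toList.map (fun c => (PySem.Dict.mk counts).getD (String.singleton c) 0)).sum

def group_symbol_counts_alt (counts : List (String × Int)) : List (String × Int) :=
  let a := pvTot counts "acgt"
  let n := pvTot counts "n"
  let i := pvTot counts "bdhvukmryws"
  let sp := pvTot counts " \t\r"
  let br := pvTot counts "\n"
  let gp := pvTot counts "-."
  let bad := (counts.map Prod.snd).sum - (a + n + i + sp + br + gp)
  [("ACGT", a), ("N", n), ("IUPAC", i), ("SPACE", sp), ("BREAK", br), ("GAP", gp),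
   ("BAD", bad), ("NUCLS", a + n + i)]

-- ===== PRECONDITION & SPEC =====
-- Pre_ excludes association lists with duplicate keys: a Python dict cannot contain them,
-- so no behaviour of A on such lists is observable.
def Pre_group_symbol_counts (counts : List (String × Int)) : Prop :=
  (counts.map Prod.fst).Nodup
instance (counts : List (String × Int)) : Decidable (Pre_group_symbol_counts counts) := by
  unfold Pre_group_symbol_counts; infer_instance

def pvWitness_group_symbol_counts : (List (String × Int)) := [("a", 2), ("X", -1), ("\n", 5)]

def Spec_group_symbol_counts (counts : List (String × Int)) (out : List (String × Int)) : Prop := out = group_symbol_counts_alt counts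
instance (counts : List (String × Int)) (out : List (String × Int)) : Decidable (Spec_group_symbol_counts counts out) := by unfold Spec_group_symbol_counts; infer_instance

-- ===== CLAIM (what is proved, stated in full; the proofs are below) =====
def Claim_equal_group_symbol_counts : Prop := ∀ (counts : List (String × Int)), Dom_group_symbol_counts counts → Pre_group_symbol_counts counts → Spec_group_symbol_counts counts (group_symbol_counts counts)

-- ===== LEMMAS AND PROOFS =====

-- classification of a symbol, as A's smbl_groups.get(smbl, "BAD")
def pvClassify (s : String) : String := (pvSmblGroups.get? s).getD "BAD"

-- per-group running sum of A's loop
def pvSig (g : String) : List (String × Int) → Int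
  | [] => 0
  | p :: rest => (if pvClassify p.1 = g then p.2 else 0) + pvSig g rest

def pvD7 (a n i sp br gp bad : Int) : PySem.Dict String Int :=
  PySem.Dict.mk [("ACGT",a),("N",n),("IUPAC",i),("SPACE",sp),("BREAK",br),("GAP",gp),("BAD",bad)]

lemma pvSmblGroups_eq : pvSmblGroups = PySem.Dict.mk
    [("a","ACGT"),("c","ACGT"),("g","ACGT"),("t","ACGT"),("n","N"),
     ("b","IUPAC"),("d","IUPAC"),("h","IUPAC"),("v","IUPAC"),("u","IUPAC"),("k","IUPAC"),
     ("m","IUPAC"),("r","IUPAC"),("y","IUPAC"),("w","IUPAC"),("s","IUPAC"),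
     (" ","SPACE"),("\t","SPACE"),("\r","SPACE"),("\n","BREAK"),("-","GAP"),(".","GAP")] := rfl

lemma pvSmblGroups_nodup : pvSmblGroups.keys.Nodup := by decide

lemma pvClassify_eq_iff (k g : String) (hg : g ≠ "BAD") :
    pvClassify k = g ↔ (k, g) ∈ pvSmblGroups.items := by
  rw [← PySem.Dict.get?_eq_some_iff_mem_items pvSmblGroups k g pvSmblGroups_nodup]
  unfold pvClassify
  cases h : pvSmblGroups.get? k with
  | none => simp [Ne.symm hg]
  | some v => simp

lemma pvMem_pairs_iff (L : List (String × String)) (k g : String) :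
    (k, g) ∈ L ↔ k ∈ (L.filter (fun p => p.2 == g)).map Prod.fst := by
  simp only [List.mem_map, List.mem_filter, beq_iff_eq]
  constructor
  · intro h; exact ⟨(k, g), ⟨h, rfl⟩, rfl⟩
  · rintro ⟨⟨a, b⟩, ⟨hm, rfl⟩, rfl⟩; exact hm

lemma pvClassify_group (g : String) (S : List Char) (hg : g ≠ "BAD")
    (hfil : (pvSmblGroups.items.filter (fun p => p.2 == g)).map Prod.fst = S.map String.singleton)
    (k : String) :
    pvClassify k = g ↔ ∃ c ∈ S, String.singleton c = k := by
  rw [pvClassify_eq_iff k g hg, pvMem_pairs_iff, hfil, List.mem_map]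

lemma pvClassify_cases (s : String) :
    pvClassify s = "ACGT" ∨ pvClassify s = "N" ∨ pvClassify s = "IUPAC" ∨
    pvClassify s = "SPACE" ∨ pvClassify s = "BREAK" ∨ pvClassify s = "GAP" ∨
    pvClassify s = "BAD" := by
  unfold pvClassify
  cases h : pvSmblGroups.get? s with
  | none => simp
  | some v =>
    have hm := PySem.Dict.mem_items_of_get?_eq_some _ h
    rw [pvSmblGroups_eq] at hm
    simp only [List.mem_cons, List.not_mem_nil, or_false, Prod.mk.injEq] at hm
    rcases hm with ⟨_,rfl⟩|⟨_,rfl⟩|⟨_,rfl⟩|⟨_,rfl⟩|⟨_,rfl⟩|⟨_,rfl⟩|⟨_,rfl⟩|⟨_,rfl⟩|⟨_,rfl⟩|⟨_,rfl⟩|⟨_,rfl⟩|⟨_,rfl⟩|⟨_,rfl⟩|⟨_,rfl⟩|⟨_,rfl⟩|⟨_,rfl⟩|⟨_,rfl⟩|⟨_,rfl⟩|⟨_,rfl⟩|⟨_,rfl⟩|⟨_,rfl⟩|⟨_,rfl⟩ <;> simp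


-- modify on the literal group dict, slot by slot
lemma pvMod_ACGT (a n i sp br gp bad v : Int) : (pvD7 a n i sp br gp bad).modify "ACGT" 0 (· + v) = pvD7 (a+v) n i sp br gp bad := rfl
lemma pvMod_N (a n i sp br gp bad v : Int) : (pvD7 a n i sp br gp bad).modify "N" 0 (· + v) = pvD7 a (n+v) i sp br gp bad := rfl
lemma pvMod_IUPAC (a n i sp br gp bad v : Int) : (pvD7 a n i sp br gp bad).modify "IUPAC" 0 (· + v) = pvD7 a n (i+v) sp br gp bad := rfl
lemma pvMod_SPACE (a n i sp br gp bad v : Int) : (pvD7 a n i sp br gp bad).modify "SPACE" 0 (· + v) = pvD7 a n i (sp+v) br gp bad := rfl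
lemma pvMod_BREAK (a n i sp br gp bad v : Int) : (pvD7 a n i sp br gp bad).modify "BREAK" 0 (· + v) = pvD7 a n i sp (br+v) gp bad := rfl
lemma pvMod_GAP (a n i sp br gp bad v : Int) : (pvD7 a n i sp br gp bad).modify "GAP" 0 (· + v) = pvD7 a n i sp br (gp+v) bad := rfl
lemma pvMod_BAD (a n i sp br gp bad v : Int) : (pvD7 a n i sp br gp bad).modify "BAD" 0 (· + v) = pvD7 a n i sp br gp (bad+v) := rfl

lemma pvD7_congr {a n i sp br gp bad a' n' i' sp' br' gp' bad' : Int}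
    (h1 : a = a') (h2 : n = n') (h3 : i = i') (h4 : sp = sp') (h5 : br = br')
    (h6 : gp = gp') (h7 : bad = bad') :
    pvD7 a n i sp br gp bad = pvD7 a' n' i' sp' br' gp' bad' := by
  rw [h1, h2, h3, h4, h5, h6, h7]

-- A's loop characterised: folding the counts bumps each slot by its per-group sum
lemma pvFold_loop (l : List (String × Int)) :
    ∀ a n i sp br gp bad : Int,
    l.foldl (fun gc p => gc.modify ((pvSmblGroups.get? p.1).getD "BAD") 0 (· + p.2))
        (pvD7 a n i sp br gp bad) =
      pvD7 (a + pvSig "ACGT" l) (n + pvSig "N" l) (i + pvSig "IUPAC" l)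
        (sp + pvSig "SPACE" l) (br + pvSig "BREAK" l) (gp + pvSig "GAP" l)
        (bad + pvSig "BAD" l) := by
  induction l with
  | nil => intro a n i sp br gp bad; simp [pvSig]
  | cons p l ih =>
    intro a n i sp br gp bad
    rw [List.foldl_cons]
    have hc : (pvSmblGroups.get? p.1).getD "BAD" = pvClassify p.1 := rfl
    rw [hc]
    rcases pvClassify_cases p.1 with h|h|h|h|h|h|h <;> rw [h] <;>
      simp only [pvMod_ACGT, pvMod_N, pvMod_IUPAC, pvMod_SPACE, pvMod_BREAK, pvMod_GAP, pvMod_BAD, ih] <;>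
      exact pvD7_congr (by simp [pvSig, h]; try omega) (by simp [pvSig, h]; try omega)
        (by simp [pvSig, h]; try omega) (by simp [pvSig, h]; try omega) (by simp [pvSig, h]; try omega)
        (by simp [pvSig, h]; try omega) (by simp [pvSig, h]; try omega)

-- A's result, in closed form
lemma pvA_char (counts : List (String × Int)) :
    group_symbol_counts counts =
      [("ACGT", pvSig "ACGT" counts), ("N", pvSig "N" counts), ("IUPAC", pvSig "IUPAC" counts),
       ("SPACE", pvSig "SPACE" counts), ("BREAK", pvSig "BREAK" counts), ("GAP", pvSig "GAP" counts),
       ("BAD", pvSig "BAD" counts),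
       ("NUCLS", pvSig "ACGT" counts + (pvSig "N" counts + pvSig "IUPAC" counts))] := by
  have hdef : group_symbol_counts counts =
      ((counts.foldl (fun gc p => gc.modify ((pvSmblGroups.get? p.1).getD "BAD") 0 (· + p.2))
          (pvD7 0 0 0 0 0 0 0)).insert "NUCLS"
        ((counts.foldl (fun gc p => gc.modify ((pvSmblGroups.get? p.1).getD "BAD") 0 (· + p.2))
            (pvD7 0 0 0 0 0 0 0)).getD "ACGT" 0 +
          ((counts.foldl (fun gc p => gc.modify ((pvSmblGroups.get? p.1).getD "BAD") 0 (· + p.2))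
              (pvD7 0 0 0 0 0 0 0)).getD "N" 0 +
            ((counts.foldl (fun gc p => gc.modify ((pvSmblGroups.get? p.1).getD "BAD") 0 (· + p.2))
                (pvD7 0 0 0 0 0 0 0)).getD "IUPAC" 0 + 0)))).items := rfl
  rw [hdef, pvFold_loop]
  simp only [zero_add, add_zero]
  rfl

-- the seven per-group sums partition the total
lemma pvSig_total (counts : List (String × Int)) :
    pvSig "ACGT" counts + pvSig "N" counts + pvSig "IUPAC" counts + pvSig "SPACE" counts +
      pvSig "BREAK" counts + pvSig "GAP" counts + pvSig "BAD" counts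
      = (counts.map Prod.snd).sum := by
  induction counts with
  | nil => simp [pvSig]
  | cons p l ih =>
    rcases pvClassify_cases p.1 with h|h|h|h|h|h|h <;>
      · simp [pvSig, h]
        omega

-- sum of an indicator over a duplicate-free char list
lemma pvSum_indicator (k : String) (v : Int) (S : List Char) (hS : S.Nodup) :
    (S.map (fun c => if k == String.singleton c then v else 0)).sum
      = if ∃ c ∈ S, String.singleton c = k then v else 0 := by
  induction S with
  | nil => simp
  | cons c S ih =>
    rcases List.nodup_cons.mp hS with ⟨hc, hS'⟩
    by_cases h : k = String.singleton c
    · subst h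
      have hz : ∀ c' ∈ S, (if String.singleton c == String.singleton c' then v else 0) = 0 := by
        intro c' hc'
        have : String.singleton c ≠ String.singleton c' := by
          intro he
          exact hc (by
            have : c = c' := by
              have := congrArg String.toList he
              simpa [String.singleton] using this
            rwa [this])
        simp [this]
      simp only [List.map_cons, List.sum_cons, beq_self_eq_true]
      rw [List.sum_eq_zero (by simpa using hz)]
      simp
    · have hne : (k == String.singleton c) = false := by simpa using h
      simp only [List.map_cons, List.sum_cons, hne, Bool.false_eq_true, if_false, zero_add]
      rw [ih hS']
      congr 1
      simp only [List.mem_cons, eq_iff_iff]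
      constructor
      · rintro ⟨c', hc', rfl⟩; exact ⟨c', Or.inr hc', rfl⟩
      · rintro ⟨c', hmem, rfl⟩
        rcases hmem with rfl | hm
        · exact absurd rfl h
        · exact ⟨c', hm, rfl⟩

-- B's per-group lookup sum equals A's per-group loop sum (keys duplicate-free)
lemma pvTot_eq_sig (g : String) (S : List Char) (hS : S.Nodup) (hg : g ≠ "BAD")
    (hfil : (pvSmblGroups.items.filter (fun p => p.2 == g)).map Prod.fst = S.map String.singleton) :
    ∀ counts : List (String × Int), (counts.map Prod.fst).Nodup →
    (S.map (fun c => (PySem.Dict.mk counts).getD (String.singleton c) 0)).sum = pvSig g counts := by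
  intro counts
  induction counts with
  | nil => intro _; simp [pvSig, PySem.Dict.getD, PySem.Dict.get?]
  | cons p l ih =>
    intro hnd
    rcases List.nodup_cons.mp hnd with ⟨hp, hl⟩
    have hrest0 : (PySem.Dict.mk l).getD p.1 0 = 0 := by
      apply PySem.Dict.getD_of_not_contains
      simpa [PySem.Dict.contains_eq_decide_mem_keys] using hp
    have hterm : ∀ c : Char,
        (PySem.Dict.mk (p :: l)).getD (String.singleton c) 0
          = (if p.1 == String.singleton c then p.2 else 0)
            + (PySem.Dict.mk l).getD (String.singleton c) 0 := by
      intro c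
      rw [PySem.Dict.getD_eq_get?_getD, PySem.Dict.get?_mk_cons]
      by_cases h : p.1 = String.singleton c
      · have hb : (p.1 == String.singleton c) = true := by simpa using h
        simp [← h, hrest0]
      · have hb : (p.1 == String.singleton c) = false := by simpa using h
        simp [hb, ← PySem.Dict.getD_eq_get?_getD]
    calc (S.map (fun c => (PySem.Dict.mk (p :: l)).getD (String.singleton c) 0)).sum
        = (S.map (fun c => (if p.1 == String.singleton c then p.2 else 0)
            + (PySem.Dict.mk l).getD (String.singleton c) 0)).sum := by
          exact congrArg List.sum (List.map_congr_left (fun c _ => hterm c))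
      _ = (S.map (fun c => if p.1 == String.singleton c then p.2 else 0)).sum
            + (S.map (fun c => (PySem.Dict.mk l).getD (String.singleton c) 0)).sum := by
          rw [← List.sum_map_add]
      _ = pvSig g (p :: l) := by
          rw [pvSum_indicator p.1 p.2 S hS, ih hl]
          show _ = (if pvClassify p.1 = g then p.2 else 0) + pvSig g l
          exact congrArg (· + pvSig g l)
            (if_congr (pvClassify_group g S hg hfil p.1).symm rfl rfl)

-- ===== VERDICT (by name: the statement is the Claim_ definition above) =====
-- the six concrete per-group facts, plus totals, give the main theorem
set_option maxRecDepth 100000 in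
theorem group_symbol_counts_spec : Claim_equal_group_symbol_counts := by
  intro counts _ hpre
  unfold Spec_group_symbol_counts
  rw [pvA_char]
  unfold group_symbol_counts_alt pvTot
  have hA := pvTot_eq_sig "ACGT" ['a','c','g','t'] (by decide) (by decide) (by decide) counts hpre
  have hN := pvTot_eq_sig "N" ['n'] (by decide) (by decide) (by decide) counts hpre
  have hI := pvTot_eq_sig "IUPAC" ['b','d','h','v','u','k','m','r','y','w','s'] (by decide) (by decide) (by decide) counts hpre
  have hS := pvTot_eq_sig "SPACE" [' ','\t','\r'] (by decide) (by decide) (by decide) counts hpre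
  have hB := pvTot_eq_sig "BREAK" ['\n'] (by decide) (by decide) (by decide) counts hpre
  have hG := pvTot_eq_sig "GAP" ['-','.'] (by decide) (by decide) (by decide) counts hpre
  have htl : ("acgt".toList) = ['a','c','g','t'] := by decide
  have h1 : ("n".toList) = ['n'] := by decide
  have h2 : ("bdhvukmryws".toList) = ['b','d','h','v','u','k','m','r','y','w','s'] := by decide
  have h3 : (" \t\r".toList) = [' ','\t','\r'] := by decide
  have h4 : ("\n".toList) = ['\n'] := by decide
  have h5 : ("-.".toList) = ['-','.'] := by decide
  rw [htl, h1, h2, h3, h4, h5, hA, hN, hI, hS, hB, hG]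
  have htot := pvSig_total counts
  simp only [List.cons.injEq, Prod.mk.injEq, and_true, true_and]
  omega
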